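-- pv_equiv track=rewrite | github.com/piotr107/KODA | utils.py | unary
-- ===== SOURCE A (Python) =====
-- def unary(q):
--     code1 = []
--     for i in range(q):
--         code1.append(1)
--     code1.append(0)
--     code2 = [str(i) for i in code1]
--     code = "".join(code2)
--     return code
-- ===== SOURCE B (Python) =====
-- def unary(q):
--     return "1" * q + "0"
-- ===== Notes on version B (the rewrite author's own statement) =====
-- stated objective: idiomatic
-- what changed: Replaced the loop building a list of ints plus str-mapping and join with the closed-form string expression "1"*q + "0".
import Mathlib
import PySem

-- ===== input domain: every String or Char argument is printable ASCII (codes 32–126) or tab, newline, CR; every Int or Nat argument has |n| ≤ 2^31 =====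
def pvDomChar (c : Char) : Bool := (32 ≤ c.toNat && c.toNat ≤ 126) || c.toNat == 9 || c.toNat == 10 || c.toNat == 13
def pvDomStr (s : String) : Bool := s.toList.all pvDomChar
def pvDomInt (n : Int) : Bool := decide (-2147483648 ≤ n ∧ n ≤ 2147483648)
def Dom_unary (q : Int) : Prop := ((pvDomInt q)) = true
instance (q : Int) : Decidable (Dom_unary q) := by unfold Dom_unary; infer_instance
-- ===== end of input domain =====

-- B replaces A's append loop + str-mapping + join with the closed form "1"*q + "0" (idiomatic).

-- ===== PORT A =====
def unary (q : Int) : String :=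
  let code1 := (PySem.List.pyRange 0 q 1).foldl (fun acc _ => acc ++ [(1 : Int)]) []
  let code1 := code1 ++ [(0 : Int)]
  let code2 := code1.map PySem.Int.toStr
  let code := PySem.Str.join "" code2
  code

-- ===== PORT B =====
-- "1" * q is ported by hand as pyRepeat on the character list (exact: Python string
-- repetition = character-list repetition), then '+' "0" appends the single '0'.
def unary_alt (q : Int) : String :=
  String.ofList (PySem.List.pyRepeat ['1'] q ++ ['0'])

-- ===== PRECONDITION & SPEC =====
def Spec_unary (q : Int) (out : String) : Prop := out = unary_alt q
instance (q : Int) (out : String) : Decidable (Spec_unary q out) := by unfold Spec_unary; infer_instance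

-- ===== CLAIM (what is proved, stated in full; the proofs are below) =====
def Claim_equal_unary : Prop := ∀ (q : Int), Dom_unary q → Spec_unary q (unary q)

-- ===== LEMMAS AND PROOFS =====

lemma foldl_append_one (l : List Int) (acc : List Int) :
    l.foldl (fun acc _ => acc ++ [(1 : Int)]) acc = acc ++ List.replicate l.length 1 := by
  induction l generalizing acc with
  | nil => simp
  | cons x xs ih =>
    rw [List.foldl_cons, ih, List.append_assoc]
    simp [List.replicate_succ]

lemma join_ones_chars : ∀ (n : Nat),
    PySem.Chars.join [] ((List.replicate n (1 : Int) ++ [0]).map PySem.Int.toChars)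
      = List.replicate n '1' ++ ['0']
  | 0 => by decide
  | n + 1 => by
    have ih := join_ones_chars n
    cases n with
    | zero => decide
    | succ m =>
      have h1 : PySem.Int.toChars 1 = ['1'] := by decide
      simp only [List.replicate_succ, List.cons_append, List.map_cons] at ih ⊢
      rw [PySem.Chars.join_cons_cons, ih, h1]
      simp

-- ===== VERDICT (by name: the statement is the Claim_ definition above) =====
theorem unary_spec : Claim_equal_unary := by
  intro q _
  show unary q = unary_alt q
  simp only [unary, unary_alt, foldl_append_one, List.nil_append,
    PySem.List.length_pyRange_one, PySem.List.pyRepeat_singleton]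
  rw [← String.toList_inj]
  simp only [PySem.Str.toList_join, List.map_map]
  have hc : String.toList ∘ PySem.Int.toStr = PySem.Int.toChars :=
    funext fun n => PySem.Int.toList_toStr n
  simpa [hc, String.toList_ofList] using join_ones_chars (q - 0).toNat
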